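-- pv_equiv track=rewrite | github.com/FedorSannikov1988/Getting_to_know_Python | homework9/task2/text_parsing.py | print_answer_for_bot_v2
-- ===== SOURCE A (Python) =====
-- def print_answer_for_bot_v2(data_in: list) -> str:
--
--         if data_in == []:
--             ansver = "по вашему запросу данные не найдены"
--         else:
--             ansver = ""
--             left_border = 0
--             right_border = 1
--
--             ansver += str(data_in[left_border][0]) \
--                 + " " + str(data_in[left_border][1]) + \
--                     " " + str(data_in[left_border][2])
--
--             if len(data_in) > 1:
--                 while True:
--                     if data_in[left_border][0] == data_in[left_border+right_border][0] \
--                         and data_in[left_border][1] == data_in[left_border+right_border][1]: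
--
--                         ansver += " " + str(data_in[left_border+right_border][2])
--                         right_border +=1
--                         if left_border+right_border == len(data_in): break
--
--                     else:
--                         left_border += right_border
--                         right_border = 1
--                         ansver += "\n"
--                         ansver += str(data_in[left_border][0]) \
--                             + " " + str(data_in[left_border][1]) + \
--                                 " " + str(data_in[left_border][2])
--                         if left_border+right_border == len(data_in): break
--
--         return ansver
-- ===== SOURCE B (Python) =====
-- def _piece(prev, row):
--     # prev is None only for the very first row: emit the full header line
--     if prev is None:
--         return str(row[0]) + " " + str(row[1]) + " " + str(row[2])
--     # string equality is transitive, so comparing with the IMMEDIATELY PRECEDING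
--     # row detects exactly the same run boundaries as A's comparison with the run leader
--     if row[0] == prev[0] and row[1] == prev[1]:
--         return " " + str(row[2])
--     return "\n" + str(row[0]) + " " + str(row[1]) + " " + str(row[2])
--
--
-- def print_answer_for_bot_v2(data_in: list) -> str:
--     if data_in == []:
--         return "по вашему запросу данные не найдены"
--     # stateless map over adjacent pairs, then one concatenation: no group
--     # pointers, no leader key, no accumulator across iterations
--     return "".join(_piece(p, r) for p, r in zip([None] + data_in, data_in))
-- ===== Notes on version B (the rewrite author's own statement) =====
-- stated objective: alternative
-- what changed: Replaces A's stateful run-detection walk (two index pointers, comparison against the run leader, incremental string growth) by a stateless map over adjacent row pairs: each row's output piece depends only on that row and its immediate predecessor (correct because string equality is transitive), and the pieces are concatenated with one join.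
import Mathlib
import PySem

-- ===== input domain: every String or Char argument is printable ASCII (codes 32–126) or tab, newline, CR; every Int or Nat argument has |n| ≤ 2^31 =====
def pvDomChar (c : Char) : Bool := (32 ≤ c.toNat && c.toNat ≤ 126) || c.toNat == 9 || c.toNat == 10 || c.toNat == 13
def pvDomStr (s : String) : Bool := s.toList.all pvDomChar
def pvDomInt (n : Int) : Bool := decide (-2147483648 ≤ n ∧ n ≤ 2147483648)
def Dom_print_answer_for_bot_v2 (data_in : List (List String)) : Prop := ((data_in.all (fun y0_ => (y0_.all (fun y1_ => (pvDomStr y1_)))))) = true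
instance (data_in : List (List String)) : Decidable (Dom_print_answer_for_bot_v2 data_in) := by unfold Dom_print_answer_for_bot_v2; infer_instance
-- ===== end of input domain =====

-- B replaces A's stateful run-detection walk (index pointers, comparison with the run
-- leader, growing accumulator) by a stateless map over adjacent row pairs concatenated
-- once at the end; objective: alternative (same cost, different algorithm).

-- ===== PORT A =====
-- A's `while True` loop; `fuel` is only a totality bound (the loop runs < len(data_in) times);
-- row/field access uses getD — inside Pre_ every access is in range, matching Python.
def pvLoopA (data_in : List (List String)) (left_border right_border : Nat) (ansver : String) :
    Nat → String
  | 0 => ansver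
  | fuel + 1 =>
    let r0 := data_in.getD left_border []
    let rr := data_in.getD (left_border + right_border) []
    if r0.getD 0 "" == rr.getD 0 "" && r0.getD 1 "" == rr.getD 1 "" then
      let ansver := ansver ++ " " ++ rr.getD 2 ""
      if left_border + (right_border + 1) == data_in.length then ansver
      else pvLoopA data_in left_border (right_border + 1) ansver fuel
    else
      let left_border := left_border + right_border
      let r := data_in.getD left_border []
      let ansver := ansver ++ "\n" ++ r.getD 0 "" ++ " " ++ r.getD 1 "" ++ " " ++ r.getD 2 ""
      if left_border + 1 == data_in.length then ansver
      else pvLoopA data_in left_border 1 ansver fuel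

def print_answer_for_bot_v2 (data_in : List (List String)) : String :=
  if data_in = [] then "по вашему запросу данные не найдены"
  else
    let r := data_in.getD 0 []
    let ansver := "" ++ r.getD 0 "" ++ " " ++ r.getD 1 "" ++ " " ++ r.getD 2 ""
    if data_in.length > 1 then pvLoopA data_in 0 1 ansver data_in.length else ansver

-- ===== PORT B =====
-- Source B's _piece: the output fragment contributed by one row, given its predecessor
def pvPiece : Option (List String) → List String → String
  | none, row => row.getD 0 "" ++ " " ++ row.getD 1 "" ++ " " ++ row.getD 2 ""
  | some prev, row =>
    if row.getD 0 "" == prev.getD 0 "" && row.getD 1 "" == prev.getD 1 "" then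
      " " ++ row.getD 2 ""
    else
      "\n" ++ row.getD 0 "" ++ " " ++ row.getD 1 "" ++ " " ++ row.getD 2 ""

-- "".join, ported by hand (exact: concatenation of the list of strings)
def pvConcat : List String → String
  | [] => ""
  | s :: l => s ++ pvConcat l

def print_answer_for_bot_v2_alt (data_in : List (List String)) : String :=
  if data_in = [] then "по вашему запросу данные не найдены"
  else
    -- zip([None] + data_in, data_in): zip truncates to the shorter list, as in Python
    pvConcat (((none :: data_in.map some).zip data_in).map fun pr => pvPiece pr.1 pr.2)

-- ===== PRECONDITION & SPEC =====
-- Pre_ excludes exactly the inputs where Python A raises IndexError: a row with fewer than 3 fields.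
def Pre_print_answer_for_bot_v2 (data_in : List (List String)) : Prop :=
  ∀ r ∈ data_in, 3 ≤ r.length
instance (data_in : List (List String)) : Decidable (Pre_print_answer_for_bot_v2 data_in) := by
  unfold Pre_print_answer_for_bot_v2; infer_instance

def pvWitness_print_answer_for_bot_v2 : List (List String) :=
  [["a", "b", "1"], ["a", "b", "2"], ["c", "d", "3"]]

def Spec_print_answer_for_bot_v2 (data_in : List (List String)) (out : String) : Prop := out = print_answer_for_bot_v2_alt data_in
instance (data_in : List (List String)) (out : String) : Decidable (Spec_print_answer_for_bot_v2 data_in out) := by unfold Spec_print_answer_for_bot_v2; infer_instance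

-- ===== CLAIM (what is proved, stated in full; the proofs are below) =====
def Claim_equal_print_answer_for_bot_v2 : Prop := ∀ (data_in : List (List String)), Dom_print_answer_for_bot_v2 data_in → Pre_print_answer_for_bot_v2 data_in → Spec_print_answer_for_bot_v2 data_in (print_answer_for_bot_v2 data_in)

-- ===== LEMMAS AND PROOFS =====

-- the common "rest of the output after the first line", for key (k0, k1)
def pvG (k0 k1 : String) : List (List String) → String
  | [] => ""
  | x :: xs =>
    if k0 == x.getD 0 "" && k1 == x.getD 1 "" then
      " " ++ x.getD 2 "" ++ pvG k0 k1 xs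
    else
      "\n" ++ x.getD 0 "" ++ " " ++ x.getD 1 "" ++ " " ++ x.getD 2 "" ++
        pvG (x.getD 0 "") (x.getD 1 "") xs

theorem pvLoopA_eq (fuel : Nat) (data_in : List (List String)) :
    ∀ left right ansver, left + right < data_in.length →
      data_in.length - (left + right) ≤ fuel →
      pvLoopA data_in left right ansver fuel
        = ansver ++ pvG ((data_in.getD left []).getD 0 "") ((data_in.getD left []).getD 1 "")
            (data_in.drop (left + right)) := by
  induction fuel with
  | zero => intro l r a h1 h2; omega
  | succ fuel ih =>
    intro left right ansver h1 h2
    have hdrop : data_in.drop (left + right)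
        = data_in.getD (left + right) [] :: data_in.drop (left + right + 1) := by
      rw [List.getD_eq_getElem data_in [] h1]
      exact (List.drop_eq_getElem_cons h1)
    rw [pvLoopA, hdrop, pvG]
    by_cases hc : ((data_in.getD left []).getD 0 "" == (data_in.getD (left + right) []).getD 0 ""
        && (data_in.getD left []).getD 1 "" == (data_in.getD (left + right) []).getD 1 "") = true
    · rw [if_pos hc, if_pos hc]
      by_cases hb : left + (right + 1) = data_in.length
      · rw [if_pos (by simpa using hb)]
        have hnil : data_in.drop (left + right + 1) = [] :=
          List.drop_eq_nil_of_le (by omega)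
        rw [hnil, pvG]
        simp [String.append_assoc]
      · rw [if_neg (by simpa using hb)]
        rw [ih left (right + 1) _ (by omega) (by omega), ← Nat.add_assoc]
        simp [String.append_assoc]
    · rw [if_neg hc, if_neg hc]
      by_cases hb : left + right + 1 = data_in.length
      · rw [if_pos (by simpa using hb)]
        have hnil : data_in.drop (left + right + 1) = [] :=
          List.drop_eq_nil_of_le (by omega)
        rw [hnil, pvG]
        simp [String.append_assoc]
      · rw [if_neg (by simpa using hb)]
        rw [ih (left + right) 1 _ (by omega) (by omega)]
        simp [String.append_assoc]

theorem pvPieces_cons (p : Option (List String)) (x : List String)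
    (l : List (Option (List String) × List String)) :
    pvConcat (((p, x) :: l).map fun pr => pvPiece pr.1 pr.2)
      = pvPiece p x ++ pvConcat (l.map fun pr => pvPiece pr.1 pr.2) := rfl

theorem pvPiece_some (prev row : List String) :
    pvPiece (some prev) row =
      if (row.getD 0 "" == prev.getD 0 "" && row.getD 1 "" == prev.getD 1 "") = true then
        " " ++ row.getD 2 ""
      else
        "\n" ++ row.getD 0 "" ++ " " ++ row.getD 1 "" ++ " " ++ row.getD 2 "" := by
  simp [pvPiece]

theorem pvBeqComm (a b : String) : (a == b) = (b == a) := by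
  by_cases h : a = b
  · simp [h]
  · simp [h, Ne.symm h]

-- B's adjacent-pair pieces, starting after a row whose key is (k0, k1), spell out pvG
theorem pvPieces_eq (rs : List (List String)) :
    ∀ (prev : List String) (k0 k1 : String),
      k0 = prev.getD 0 "" → k1 = prev.getD 1 "" →
      pvConcat (((some prev :: rs.map some).zip rs).map fun pr => pvPiece pr.1 pr.2)
        = pvG k0 k1 rs := by
  induction rs with
  | nil => intro prev k0 k1 h0 h1; rfl
  | cons x xs ih =>
    intro prev k0 k1 h0 h1
    rw [List.map_cons, List.zip_cons_cons, pvPieces_cons, pvPiece_some, pvG]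
    rw [pvBeqComm (x.getD 0 "") (prev.getD 0 ""), pvBeqComm (x.getD 1 "") (prev.getD 1 ""),
      ← h0, ← h1]
    by_cases hc : (k0 == x.getD 0 "" && k1 == x.getD 1 "") = true
    · rw [if_pos hc, if_pos hc]
      have hc' := hc
      simp only [Bool.and_eq_true, beq_iff_eq] at hc'
      rw [ih x k0 k1 hc'.1 hc'.2]
    · rw [if_neg hc, if_neg hc]
      rw [ih x (x.getD 0 "") (x.getD 1 "") rfl rfl]

-- ===== VERDICT (by name: the statement is the Claim_ definition above) =====
theorem print_answer_for_bot_v2_spec : Claim_equal_print_answer_for_bot_v2 := by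
  intro data_in _ _
  unfold Spec_print_answer_for_bot_v2
  cases data_in with
  | nil => rfl
  | cons r rs =>
    rw [print_answer_for_bot_v2_alt, if_neg (by simp)]
    rw [List.map_cons, show (none :: some r :: rs.map some).zip (r :: rs)
        = (none, r) :: ((some r :: rs.map some).zip rs) from rfl]
    rw [pvPieces_cons, pvPieces_eq rs r _ _ rfl rfl]
    rw [show pvPiece none r = r.getD 0 "" ++ " " ++ r.getD 1 "" ++ " " ++ r.getD 2 "" from rfl]
    cases rs with
    | nil =>
      simp [print_answer_for_bot_v2, pvG, String.append_assoc]
    | cons x xs =>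
      rw [print_answer_for_bot_v2, if_neg (by simp), if_pos (by simp)]
      rw [pvLoopA_eq ((r :: x :: xs).length) (r :: x :: xs) 0 1 _ (by simp) (by omega)]
      simp [String.append_assoc]
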